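-- pv_equiv track=rewrite | github.com/jrfdy6/closetgptrenew | comprehensive_metadata_audit.py | extract_keywords_from_tags
-- ===== SOURCE A (Python) =====
-- KNOWN_OCCASIONS = [
--     'casual', 'business', 'formal', 'athletic', 'sport', 'gym',
--     'loungewear', 'beach', 'party', 'date', 'outdoor', 'travel'
-- ]
--
-- KNOWN_STYLES = [
--     'classic', 'modern', 'minimalist', 'bohemian', 'preppy',
--     'edgy', 'romantic', 'athletic', 'streetwear', 'professional'
-- ]
--
-- KNOWN_MOODS = [
--     'confident', 'relaxed', 'professional', 'playful',
--     'elegant', 'bold', 'comfortable', 'creative'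
-- ]
--
-- def extract_keywords_from_tags(tags):
--     """Extract potential occasion/style/mood values from tags."""
--     if not tags:
--         return {'occasions': [], 'styles': [], 'moods': []}
--
--     extracted = {
--         'occasions': [],
--         'styles': [],
--         'moods': []
--     }
--
--     for tag in tags:
--         tag_lower = tag.lower()
--         if tag_lower in KNOWN_OCCASIONS:
--             extracted['occasions'].append(tag)
--         if tag_lower in KNOWN_STYLES:
--             extracted['styles'].append(tag)
--         if tag_lower in KNOWN_MOODS:
--             extracted['moods'].append(tag)
--
--     return extracted
-- ===== SOURCE B (Python) =====
-- KNOWN_OCCASIONS = [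
--     'casual', 'business', 'formal', 'athletic', 'sport', 'gym',
--     'loungewear', 'beach', 'party', 'date', 'outdoor', 'travel'
-- ]
--
-- KNOWN_STYLES = [
--     'classic', 'modern', 'minimalist', 'bohemian', 'preppy',
--     'edgy', 'romantic', 'athletic', 'streetwear', 'professional'
-- ]
--
-- KNOWN_MOODS = [
--     'confident', 'relaxed', 'professional', 'playful',
--     'elegant', 'bold', 'comfortable', 'creative'
-- ]
--
-- CATEGORIES = (
--     ('occasions', frozenset(KNOWN_OCCASIONS)),
--     ('styles', frozenset(KNOWN_STYLES)),
--     ('moods', frozenset(KNOWN_MOODS)),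
-- )
--
--
-- def extract_keywords_from_tags(tags):
--     """Extract potential occasion/style/mood values from tags."""
--     if not tags:
--         return {'occasions': [], 'styles': [], 'moods': []}
--     lowered = [tag.lower() for tag in tags]
--     return {cat: [tag for tag, low in zip(tags, lowered) if low in kws]
--             for cat, kws in CATEGORIES}
-- ===== Notes on version B (the rewrite author's own statement) =====
-- stated objective: simpler
-- what changed: B inverts the loop nesting: instead of A's tag-major pass mutating a dict through three membership branches, B lowercases every tag once and builds the result category-major as a dict comprehension of three independent filters over the zipped (tag, lowered) pairs, with no mutation.
import Mathlib
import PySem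

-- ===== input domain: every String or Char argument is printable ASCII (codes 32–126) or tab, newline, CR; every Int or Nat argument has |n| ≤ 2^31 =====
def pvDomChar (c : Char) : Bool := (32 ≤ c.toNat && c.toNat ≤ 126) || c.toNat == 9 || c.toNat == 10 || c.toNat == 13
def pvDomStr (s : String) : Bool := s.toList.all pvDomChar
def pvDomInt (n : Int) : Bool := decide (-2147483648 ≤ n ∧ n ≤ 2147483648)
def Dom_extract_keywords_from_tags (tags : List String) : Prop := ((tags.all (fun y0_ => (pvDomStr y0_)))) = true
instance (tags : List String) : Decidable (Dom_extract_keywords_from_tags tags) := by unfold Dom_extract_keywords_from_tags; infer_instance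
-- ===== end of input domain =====

-- B inverts the loop nesting: instead of A's tag-major pass mutating a dict through three
-- membership branches, B lowercases once and builds the result category-major as a
-- dict comprehension of three filters over the (tag, lowered) pairs (simpler, no mutation).

-- ===== PORT A =====
def KNOWN_OCCASIONS : List String :=
  ["casual", "business", "formal", "athletic", "sport", "gym",
   "loungewear", "beach", "party", "date", "outdoor", "travel"]

def KNOWN_STYLES : List String :=
  ["classic", "modern", "minimalist", "bohemian", "preppy",
   "edgy", "romantic", "athletic", "streetwear", "professional"]

def KNOWN_MOODS : List String :=
  ["confident", "relaxed", "professional", "playful",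
   "elegant", "bold", "comfortable", "creative"]

def extract_keywords_from_tags (tags : List String) : List (String × List String) :=
  if tags = [] then [("occasions", []), ("styles", []), ("moods", [])]
  else
    let extracted : PySem.Dict String (List String) :=
      PySem.Dict.ofList [("occasions", []), ("styles", []), ("moods", [])]
    (tags.foldl (fun d tag =>
      let tag_lower := PySem.Str.lower tag
      let d := if tag_lower ∈ KNOWN_OCCASIONS then d.modify "occasions" [] (· ++ [tag]) else d
      let d := if tag_lower ∈ KNOWN_STYLES then d.modify "styles" [] (· ++ [tag]) else d
      if tag_lower ∈ KNOWN_MOODS then d.modify "moods" [] (· ++ [tag]) else d) extracted).items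

-- ===== PORT B =====
-- CATEGORIES from Source B: category name paired with frozenset of its keywords
def CATEGORIES : List (String × PySem.Set String) :=
  [("occasions", PySem.Set.ofList KNOWN_OCCASIONS),
   ("styles", PySem.Set.ofList KNOWN_STYLES),
   ("moods", PySem.Set.ofList KNOWN_MOODS)]

-- dict comprehension over CATEGORIES (three distinct literal keys ⇒ items = the mapped list)
def extract_keywords_from_tags_alt (tags : List String) : List (String × List String) :=
  if tags = [] then [("occasions", []), ("styles", []), ("moods", [])]
  else
    let lowered := tags.map PySem.Str.lower
    CATEGORIES.map (fun p =>
      (p.1, ((tags.zip lowered).filter (fun q => q.2 ∈ p.2)).map Prod.fst))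

-- ===== PRECONDITION & SPEC =====
def Spec_extract_keywords_from_tags (tags : List String) (out : List (String × List String)) : Prop := out = extract_keywords_from_tags_alt tags
instance (tags : List String) (out : List (String × List String)) : Decidable (Spec_extract_keywords_from_tags tags out) := by unfold Spec_extract_keywords_from_tags; infer_instance

-- ===== CLAIM (what is proved, stated in full; the proofs are below) =====
def Claim_equal_extract_keywords_from_tags : Prop := ∀ (tags : List String), Dom_extract_keywords_from_tags tags → Spec_extract_keywords_from_tags tags (extract_keywords_from_tags tags)

-- ===== LEMMAS AND PROOFS =====

-- tags whose lowercase lies in the given keyword list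
def sel (kws : List String) (tags : List String) : List String :=
  tags.filter (fun t => PySem.Str.lower t ∈ kws)

-- one step of A's loop on the three-key dict state
lemma stepA_eval (t : String) (o s m : List String) :
    (let tag_lower := PySem.Str.lower t
     let d := (PySem.Dict.mk [("occasions", o), ("styles", s), ("moods", m)])
     let d := if tag_lower ∈ KNOWN_OCCASIONS then d.modify "occasions" [] (· ++ [t]) else d
     let d := if tag_lower ∈ KNOWN_STYLES then d.modify "styles" [] (· ++ [t]) else d
     if tag_lower ∈ KNOWN_MOODS then d.modify "moods" [] (· ++ [t]) else d) =
    PySem.Dict.mk [("occasions", o ++ sel KNOWN_OCCASIONS [t]),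
                   ("styles", s ++ sel KNOWN_STYLES [t]),
                   ("moods", m ++ sel KNOWN_MOODS [t])] := by
  simp only [sel, List.filter]
  split_ifs <;>
    simp [PySem.Dict.modify, PySem.Dict.insert, PySem.Dict.contains,
      PySem.Dict.getD, PySem.Dict.get?, *]

lemma foldA (tags o s m : List String) :
    (tags.foldl (fun d tag =>
      let tag_lower := PySem.Str.lower tag
      let d := if tag_lower ∈ KNOWN_OCCASIONS then d.modify "occasions" [] (· ++ [tag]) else d
      let d := if tag_lower ∈ KNOWN_STYLES then d.modify "styles" [] (· ++ [tag]) else d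
      if tag_lower ∈ KNOWN_MOODS then d.modify "moods" [] (· ++ [tag]) else d)
      (PySem.Dict.mk [("occasions", o), ("styles", s), ("moods", m)])) =
    PySem.Dict.mk [("occasions", o ++ sel KNOWN_OCCASIONS tags),
                   ("styles", s ++ sel KNOWN_STYLES tags),
                   ("moods", m ++ sel KNOWN_MOODS tags)] := by
  induction tags generalizing o s m with
  | nil => simp [sel]
  | cons t ts ih =>
      rw [List.foldl_cons, stepA_eval, ih]
      have hsel : ∀ kws : List String, sel kws (t :: ts) = sel kws [t] ++ sel kws ts := by
        intro kws; simp [sel, List.filter_cons]; split_ifs <;> simp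
      simp [hsel, List.append_assoc]

lemma zip_filter_map (kws tags : List String) :
    (((tags.zip (tags.map PySem.Str.lower)).filter
        (fun q => q.2 ∈ PySem.Set.ofList kws)).map Prod.fst) =
    sel kws tags := by
  induction tags with
  | nil => rfl
  | cons t ts ih =>
      simp only [sel, PySem.Set.mem_ofList, List.map_cons, List.zip_cons_cons,
        List.filter_cons] at ih ⊢
      by_cases h : PySem.Str.lower t ∈ kws <;> simp [h, ih]

-- ===== VERDICT (by name: the statement is the Claim_ definition above) =====
theorem extract_keywords_from_tags_spec : Claim_equal_extract_keywords_from_tags := by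
  intro tags _
  unfold Spec_extract_keywords_from_tags extract_keywords_from_tags extract_keywords_from_tags_alt
  by_cases h : tags = []
  · simp [h]
  · simp only [h, if_false]
    have hof : PySem.Dict.ofList [("occasions", ([] : List String)), ("styles", []), ("moods", [])] =
        PySem.Dict.mk [("occasions", []), ("styles", []), ("moods", [])] := rfl
    rw [hof, foldA]
    simp only [CATEGORIES, List.map_cons, List.map_nil,
      zip_filter_map KNOWN_OCCASIONS, zip_filter_map KNOWN_STYLES, zip_filter_map KNOWN_MOODS]
    simp
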